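-- pv_equiv track=rewrite | github.com/andrsd/otter | otter/plugins/computed_vs_measured/ComputedVsMeasuredWindow.py | buildFileList
-- ===== SOURCE A (Python) =====
-- def buildFileList(file_names):
--     """
--     Take a list of file names and build a list of file name pairs with
--     computed and measured data. We assume that 'gold' in file name refers
--     to measured data. The lack of 'gold' refers to computed.
--
--     @param file_names[list]: The list of file names
--     @return list of pairs [measured, computed]
--     """
--     measured = []
--     computed = []
--     for file in file_names:
--         if 'gold' in file:
--             measured.append(file)
--         else:
--             computed.append(file)
--
--     measured.sort()
--     computed.sort()
--
--     flist = []
--     for m, c in zip(measured, computed):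
--         flist.append([m, c])
--
--     return flist
-- ===== SOURCE B (Python) =====
-- def _insert_sorted(lst, x):
--     """Insert x into the sorted list lst in place at the position found
--     by binary search (after any equal elements)."""
--     lo = 0
--     hi = len(lst)
--     while lo < hi:
--         mid = (lo + hi) // 2
--         if lst[mid] <= x:
--             lo = mid + 1
--         else:
--             hi = mid
--     lst.insert(lo, x)
--
-- def buildFileList(file_names):
--     """Same result as A: maintain the two groups as already-sorted lists
--     by binary-search insertion (no sort call), then consume both lists
--     head-by-head to build the pairs."""
--     measured = []
--     computed = []
--     for f in file_names:
--         if 'gold' in f: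
--             _insert_sorted(measured, f)
--         else:
--             _insert_sorted(computed, f)
--     flist = []
--     while measured and computed:
--         flist.append([measured[0], computed[0]])
--         measured = measured[1:]
--         computed = computed[1:]
--     return flist
-- ===== Notes on version B (the rewrite author's own statement) =====
-- stated objective: alternative
-- what changed: B never calls sort: it maintains measured/computed as sorted lists by hand-written binary-search insertion during the single pass (online insertion), and builds the pairs by consuming both lists head-by-head, instead of A's partition-then-two-.sort()-calls-then-zip loop.
import Mathlib
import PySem

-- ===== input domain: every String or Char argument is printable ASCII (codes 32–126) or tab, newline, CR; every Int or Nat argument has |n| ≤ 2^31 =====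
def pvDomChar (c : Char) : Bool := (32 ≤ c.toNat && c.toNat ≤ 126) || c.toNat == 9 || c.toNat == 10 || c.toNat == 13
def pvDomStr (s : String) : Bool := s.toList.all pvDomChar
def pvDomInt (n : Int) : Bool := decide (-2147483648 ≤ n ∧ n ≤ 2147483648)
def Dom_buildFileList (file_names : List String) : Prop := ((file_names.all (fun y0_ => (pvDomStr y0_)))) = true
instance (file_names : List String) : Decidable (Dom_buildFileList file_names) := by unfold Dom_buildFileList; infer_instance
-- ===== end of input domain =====

-- B keeps both groups sorted by binary-search insertion during the single pass (no sort call)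
-- and pairs them head-by-head; equal return values proved below.

-- ===== PORT A =====
-- split into measured/computed, sort each, then an explicit loop building the pairs
def buildFileList (file_names : List String) : List (List String) :=
  let mc := file_names.foldl
    (fun (acc : List String × List String) file =>
      if PySem.Str.isIn "gold" file then (acc.1 ++ [file], acc.2)
      else (acc.1, acc.2 ++ [file])) ([], [])
  let measured := PySem.List.sorted mc.1 (fun x => x) false
  let computed := PySem.List.sorted mc.2 (fun x => x) false
  (measured.zip computed).foldl (fun flist p => flist ++ [[p.1, p.2]]) []

-- ===== PORT B =====
-- _insert_sorted's binary-search while-loop (lo,hi : Nat; lst[mid] is always in range, ported as getD)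
def pvBisectLoop (lst : List String) (x : String) (lo hi : Nat) : Nat :=
  if h : lo < hi then
    let mid := (lo + hi) / 2
    if (lst.getD mid "") ≤ x then pvBisectLoop lst x (mid + 1) hi
    else pvBisectLoop lst x lo mid
  else lo
termination_by hi - lo
decreasing_by
  · omega
  · omega

-- lst.insert(lo, x) at the found position
def pvInsSorted (lst : List String) (x : String) : List String :=
  let lo := pvBisectLoop lst x 0 lst.length
  lst.take lo ++ x :: lst.drop lo

-- the pair-building while-loop: consume both lists head-by-head
def pvPairUp : List String → List String → List (List String)
  | m :: ms, c :: cs => [m, c] :: pvPairUp ms cs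
  | _, _ => []

def buildFileList_alt (file_names : List String) : List (List String) :=
  let mc := file_names.foldl
    (fun (acc : List String × List String) f =>
      if PySem.Str.isIn "gold" f then (pvInsSorted acc.1 f, acc.2)
      else (acc.1, pvInsSorted acc.2 f)) ([], [])
  pvPairUp mc.1 mc.2

-- ===== PRECONDITION & SPEC =====
def Spec_buildFileList (file_names : List String) (out : List (List String)) : Prop := out = buildFileList_alt file_names
instance (file_names : List String) (out : List (List String)) : Decidable (Spec_buildFileList file_names out) := by unfold Spec_buildFileList; infer_instance

-- ===== CLAIM =====
def Claim_equal_buildFileList : Prop := ∀ (file_names : List String), Dom_buildFileList file_names → Spec_buildFileList file_names (buildFileList file_names)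

-- ===== LEMMAS AND PROOFS =====

theorem pvGetD_mono {l : List String} (h : l.Pairwise (· ≤ ·)) {i j : Nat}
    (hij : i ≤ j) (hj : j < l.length) : l.getD i "" ≤ l.getD j "" := by
  rcases Nat.eq_or_lt_of_le hij with rfl | hlt
  · exact le_refl _
  · have hi : i < l.length := lt_trans hlt hj
    have := List.pairwise_iff_getElem.mp h i j hi hj hlt
    simpa [List.getD_eq_getElem, hi, hj] using this

-- binary-search loop invariant on a sorted list: everything left of the result is ≤ x,
-- everything from the result on is > x
theorem pvBisectLoop_spec (lst : List String) (x : String) (hsort : lst.Pairwise (· ≤ ·)) :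
    ∀ fuel lo hi, hi - lo ≤ fuel → lo ≤ hi → hi ≤ lst.length →
    (∀ i, i < lo → lst.getD i "" ≤ x) →
    (∀ i, hi ≤ i → i < lst.length → ¬ lst.getD i "" ≤ x) →
    (∀ i, i < pvBisectLoop lst x lo hi → lst.getD i "" ≤ x) ∧
    (∀ i, pvBisectLoop lst x lo hi ≤ i → i < lst.length → ¬ lst.getD i "" ≤ x) := by
  intro fuel
  induction fuel with
  | zero =>
    intro lo hi hf hlh _ hlow hhigh
    have : lo = hi := by omega
    subst this
    rw [pvBisectLoop]
    simp only [lt_irrefl, dite_false]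
    exact ⟨hlow, hhigh⟩
  | succ n ih =>
    intro lo hi hf hlh hhl hlow hhigh
    rw [pvBisectLoop]
    by_cases h : lo < hi
    · simp only [h, dite_true]
      by_cases hm : lst.getD ((lo + hi) / 2) "" ≤ x
      · simp only [hm, if_true]
        refine ih ((lo + hi) / 2 + 1) hi (by omega) (by omega) hhl ?_ hhigh
        intro i hi2
        exact le_trans (pvGetD_mono hsort (by omega) (by omega)) hm
      · simp only [hm, if_false]
        refine ih lo ((lo + hi) / 2) (by omega) (by omega) (by omega) hlow ?_
        intro i hi2 hil hcon
        exact hm (le_trans (pvGetD_mono hsort hi2 hil) hcon)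
    · simp only [h, dite_false]
      have : lo = hi := by omega
      subst this
      exact ⟨hlow, hhigh⟩

theorem pvInsSorted_perm (x : String) (l : List String) :
    (pvInsSorted l x).Perm (x :: l) := by
  unfold pvInsSorted
  have h1 : (l.take (pvBisectLoop l x 0 l.length) ++ x :: l.drop (pvBisectLoop l x 0 l.length)).Perm
      (x :: (l.take (pvBisectLoop l x 0 l.length) ++ l.drop (pvBisectLoop l x 0 l.length))) :=
    List.perm_middle
  rwa [List.take_append_drop] at h1

theorem pvInsSorted_pairwise (x : String) {l : List String}
    (h : l.Pairwise (· ≤ ·)) : (pvInsSorted l x).Pairwise (· ≤ ·) := by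
  unfold pvInsSorted
  set r := pvBisectLoop l x 0 l.length with hrdef
  have hspec := pvBisectLoop_spec l x h l.length 0 l.length (by omega) (by omega) (le_refl _)
    (by omega) (by intro i hi1 hi2; omega)
  have htake : ∀ a ∈ l.take r, a ≤ x := by
    intro a ha
    rcases List.mem_iff_getElem.mp ha with ⟨i, hilen, hget⟩
    have hir : i < r := by
      have := hilen; simp [List.length_take] at this; omega
    have hil : i < l.length := by
      have := hilen; simp [List.length_take] at this; omega
    have := hspec.1 i hir
    rw [List.getD_eq_getElem _ _ hil] at this
    rw [← hget, List.getElem_take]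
    exact this
  have hdrop : ∀ a ∈ l.drop r, x ≤ a := by
    intro a ha
    rcases List.mem_iff_getElem.mp ha with ⟨i, hilen, hget⟩
    have hil : r + i < l.length := by
      have := hilen; simp [List.length_drop] at this; omega
    have := hspec.2 (r + i) (by omega) hil
    rw [List.getD_eq_getElem _ _ hil] at this
    rw [← hget, List.getElem_drop]
    exact le_of_not_ge (fun hc => this hc)
  rw [List.pairwise_append]
  refine ⟨h.sublist (List.take_sublist _ _), ?_, ?_⟩
  · refine List.pairwise_cons.mpr ⟨hdrop, h.sublist (List.drop_sublist _ _)⟩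
  · intro a ha b hb
    rcases List.mem_cons.mp hb with rfl | hb
    · exact htake a ha
    · exact le_trans (htake a ha) (hdrop b hb)

theorem pvFoldlIns_perm (l : List String) : ∀ acc : List String,
    (l.foldl pvInsSorted acc).Perm (acc ++ l) := by
  induction l with
  | nil => intro acc; simp
  | cons x xs ih =>
    intro acc
    have h1 : (xs.foldl pvInsSorted (pvInsSorted acc x)).Perm ((pvInsSorted acc x) ++ xs) := ih _
    refine h1.trans ?_
    have h2 : (pvInsSorted acc x ++ xs).Perm ((x :: acc) ++ xs) :=
      (pvInsSorted_perm x acc).append_right xs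
    exact h2.trans (by simpa using (List.perm_middle (a := x) (l₁ := acc) (l₂ := xs)).symm)

theorem pvFoldlIns_pairwise (l : List String) : ∀ acc : List String,
    acc.Pairwise (· ≤ ·) → (l.foldl pvInsSorted acc).Pairwise (· ≤ ·) := by
  induction l with
  | nil => intro acc h; simpa using h
  | cons x xs ih => intro acc h; exact ih _ (pvInsSorted_pairwise x h)

-- the insertion loop computes exactly Python's sorted (identity key)
theorem pvFoldlIns_eq_sorted (l : List String) :
    l.foldl pvInsSorted [] = PySem.List.sorted l (fun x => x) false := by
  symm
  apply PySem.List.sorted_id_eq_of_perm_of_pairwise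
  · simpa using pvFoldlIns_perm l []
  · exact pvFoldlIns_pairwise l [] (by simp)

-- the head-by-head pairing loop is zip+map
theorem pvPairUp_eq_zip_map (m : List String) : ∀ c : List String,
    pvPairUp m c = (m.zip c).map (fun p => [p.1, p.2]) := by
  induction m with
  | nil => intro c; cases c <;> simp [pvPairUp]
  | cons a ms ih => intro c; cases c <;> simp [pvPairUp, ih]

-- the combined split+insert loop is two independent insert loops over the filters
theorem pvSplitIns_eq (p : String → Bool) (l : List String) :
    l.foldl (fun (acc : List String × List String) f =>
      if p f then (pvInsSorted acc.1 f, acc.2) else (acc.1, pvInsSorted acc.2 f)) ([], [])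
    = ((l.filter p).foldl pvInsSorted [], (l.filter (fun f => !p f)).foldl pvInsSorted []) := by
  have hstep : (fun (acc : List String × List String) f =>
      if p f then (pvInsSorted acc.1 f, acc.2) else (acc.1, pvInsSorted acc.2 f))
      = (fun (acc : List String × List String) f =>
        ((fun (a : List String) f => if p f then pvInsSorted a f else a) acc.1 f,
         (fun (b : List String) f => if !p f then pvInsSorted b f else b) acc.2 f)) := by
    funext acc f
    by_cases h : p f = true <;> simp [h]
  rw [hstep, PySem.List.foldl_prod_mk
    (f := fun (a : List String) f => if p f then pvInsSorted a f else a)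
    (g := fun (b : List String) f => if !p f then pvInsSorted b f else b)]
  rw [PySem.List.foldl_if_eq_foldl_filter, PySem.List.foldl_if_eq_foldl_filter]

-- A's split loop is the pair of filters
theorem pvSplit_eq (p : String → Bool) (l : List String) :
    l.foldl (fun (acc : List String × List String) f =>
      if p f then (acc.1 ++ [f], acc.2) else (acc.1, acc.2 ++ [f])) ([], [])
    = (l.filter p, l.filter (fun f => !p f)) := by
  have hstep : (fun (acc : List String × List String) f =>
      if p f then (acc.1 ++ [f], acc.2) else (acc.1, acc.2 ++ [f]))
      = (fun (acc : List String × List String) f =>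
        ((fun (a : List String) f => if p f then a ++ [f] else a) acc.1 f,
         (fun (b : List String) f => if !p f then b ++ [f] else b) acc.2 f)) := by
    funext acc f
    by_cases h : p f = true <;> simp [h]
  rw [hstep, PySem.List.foldl_prod_mk
    (f := fun (a : List String) f => if p f then a ++ [f] else a)
    (g := fun (b : List String) f => if !p f then b ++ [f] else b)]
  rw [PySem.List.foldl_append_if_eq_filter, PySem.List.foldl_append_if_eq_filter]
  simp

-- ===== VERDICT =====
theorem buildFileList_spec : Claim_equal_buildFileList := by
  intro file_names _
  show _ = _
  unfold buildFileList buildFileList_alt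
  simp only [pvSplit_eq, pvSplitIns_eq, pvFoldlIns_eq_sorted]
  rw [PySem.List.foldl_append_singleton_eq_map (f := fun (p : String × String) => [p.1, p.2])]
  rw [pvPairUp_eq_zip_map]
  simp
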